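-- pv_equiv track=rewrite | github.com/J-CHOO/Coding-Test | Programmers/level1/모의고사.py | solution
-- ===== SOURCE A (Python) =====
-- def solution(answers):
--     num_1 = [1, 2, 3, 4 ,5]
--     num_2 = [2, 1, 2, 3, 2, 4, 2, 5]
--     num_3 = [3, 3, 1, 1, 2, 2, 4, 4, 5, 5]
--     score = [0, 0, 0]
--     answer = []
--
--     for i in range(len(answers)):
--         if answers[i] == num_1[i % 5]:
--             score[0] += 1
--         if answers[i] == num_2[i % 8]:
--             score[1] += 1
--         if answers[i] == num_3[i % 10]:
--             score[2] += 1
--     for i, j in enumerate(score): #enumerate함수는 리스트의 해당원소의 인덱스를 튜플로 반환해준다.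
--         if j == max(score):
--             answer.append(i+1)
--
--     return answer
-- ===== SOURCE B (Python) =====
-- def solution(answers):
--     patterns = [[1, 2, 3, 4, 5],
--                 [2, 1, 2, 3, 2, 4, 2, 5],
--                 [3, 3, 1, 1, 2, 2, 4, 4, 5, 5]]
--     # Histogram pass: all three patterns repeat with period dividing 40, so the
--     # pair (i % 40, answers[i]) determines every match.  Count those pairs once,
--     # then read each student's score off the 40-entry table.
--     cnt = {}
--     for i, a in enumerate(answers):
--         k = (i % 40, a)
--         cnt[k] = cnt.get(k, 0) + 1
--     scores = [sum(cnt.get((r, p[r % len(p)]), 0) for r in range(40))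
--               for p in patterns]
--     best = max(scores)
--     return [i + 1 for i, s in enumerate(scores) if s == best]
-- ===== Notes on version B (the rewrite author's own statement) =====
-- stated objective: alternative
-- what changed: Instead of testing each answer against the three patterns directly, B builds a histogram of (index mod 40, answer) pairs in one pass (40 = lcm of the pattern periods 5, 8, 10) and reads each student's score as a 40-entry table-row sum over that histogram; winner selection stays max-based so ties and empty input match A exactly.
import Mathlib
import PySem

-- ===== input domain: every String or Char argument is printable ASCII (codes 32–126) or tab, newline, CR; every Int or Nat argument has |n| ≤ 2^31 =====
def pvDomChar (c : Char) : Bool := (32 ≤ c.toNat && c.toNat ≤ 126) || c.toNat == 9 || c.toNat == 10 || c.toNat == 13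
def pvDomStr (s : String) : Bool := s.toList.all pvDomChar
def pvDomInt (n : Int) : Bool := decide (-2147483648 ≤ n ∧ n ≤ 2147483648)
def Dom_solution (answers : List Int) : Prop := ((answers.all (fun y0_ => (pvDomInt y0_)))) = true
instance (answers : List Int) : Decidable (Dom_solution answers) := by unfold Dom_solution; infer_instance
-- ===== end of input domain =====

-- B replaces A's three-counter scan by a histogram of (i % 40, answer) pairs
-- (40 = lcm of the pattern periods) read back through a 40-entry table per
-- pattern (objective: alternative).

-- ===== PORT A =====
-- indices i, i % 5, i % 8, i % 10 are always in range, so pyGetD with default 0 is exact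
def solution (answers : List Int) : List Int :=
  let num1 : List Int := [1, 2, 3, 4, 5]
  let num2 : List Int := [2, 1, 2, 3, 2, 4, 2, 5]
  let num3 : List Int := [3, 3, 1, 1, 2, 2, 4, 4, 5, 5]
  let score : Int × Int × Int :=
    (PySem.List.pyRange 0 (answers.length : Int) 1).foldl (fun s i =>
      let s := if PySem.List.pyGetD answers i 0 == PySem.List.pyGetD num1 (PySem.Int.mod i 5) 0
               then (s.1 + 1, s.2.1, s.2.2) else s
      let s := if PySem.List.pyGetD answers i 0 == PySem.List.pyGetD num2 (PySem.Int.mod i 8) 0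
               then (s.1, s.2.1 + 1, s.2.2) else s
      if PySem.List.pyGetD answers i 0 == PySem.List.pyGetD num3 (PySem.Int.mod i 10) 0
      then (s.1, s.2.1, s.2.2 + 1) else s) (0, 0, 0)
  let scoreL : List Int := [score.1, score.2.1, score.2.2]
  -- max(score) is loop-invariant; computed once (value identical each iteration)
  let m : Int := (PySem.List.max? scoreL (fun y => y)).getD 0
  (PySem.List.enumerate scoreL).foldl
    (fun acc ij => if ij.2 == m then acc ++ [ij.1 + 1] else acc) []

-- ===== PORT B =====
def solution_alt (answers : List Int) : List Int :=
  let patterns : List (List Int) :=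
    [[1, 2, 3, 4, 5], [2, 1, 2, 3, 2, 4, 2, 5], [3, 3, 1, 1, 2, 2, 4, 4, 5, 5]]
  let cnt : PySem.Dict (Int × Int) Int :=
    (PySem.List.enumerate answers).foldl
      (fun d ia =>
        let k : Int × Int := (PySem.Int.mod ia.1 40, ia.2)
        d.insert k (d.getD k 0 + 1)) PySem.Dict.empty
  let scores : List Int := patterns.map (fun p =>
    ((PySem.List.pyRange 0 40 1).map (fun r =>
        cnt.getD (r, PySem.List.pyGetD p (PySem.Int.mod r (p.length : Int)) 0) 0)).sum)
  let best : Int := (PySem.List.max? scores (fun y => y)).getD 0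
  (PySem.List.enumerate scores).filterMap
    (fun is_ => if is_.2 == best then some (is_.1 + 1) else none)

-- ===== PRECONDITION & SPEC =====
def Spec_solution (answers : List Int) (out : List Int) : Prop := out = solution_alt answers
instance (answers : List Int) (out : List Int) : Decidable (Spec_solution answers out) := by unfold Spec_solution; infer_instance

-- ===== CLAIM (what is proved, stated in full; the proofs are below) =====
def Claim_equal_solution : Prop := ∀ (answers : List Int), Dom_solution answers → Spec_solution answers (solution answers)

-- ===== LEMMAS AND PROOFS =====

-- A's single loop over indices splits into three independent counters.
theorem triple_count (l : List Int) (p1 p2 p3 : Int → Bool) (s : Int × Int × Int) :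
    l.foldl (fun s i =>
      let s := if p1 i then (s.1 + 1, s.2.1, s.2.2) else s
      let s := if p2 i then (s.1, s.2.1 + 1, s.2.2) else s
      if p3 i then (s.1, s.2.1, s.2.2 + 1) else s) s
    = (s.1 + (l.countP p1 : Int), s.2.1 + (l.countP p2 : Int), s.2.2 + (l.countP p3 : Int)) := by
  induction l generalizing s with
  | nil => simp
  | cons x xs ih =>
      simp only [List.foldl_cons, List.countP_cons, ih]
      split_ifs <;> simp [Prod.ext_iff] <;> omega

-- a 0/1 sum over a duplicate-free list that contains m picks out the single term at m
theorem sum_ite_unique (R : List Int) (m : Int) (c : Int → Bool)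
    (hm : m ∈ R) (hnd : R.Nodup) :
    (R.map (fun r => if m == r && c r then (1 : Int) else 0)).sum
      = if c m then 1 else 0 := by
  induction R with
  | nil => cases hm
  | cons x t ih =>
      rcases List.nodup_cons.1 hnd with ⟨hx, hnt⟩
      rcases List.mem_cons.1 hm with h | h
      · subst h
        have htail : (t.map (fun r => if m == r && c r then (1 : Int) else 0)).sum = 0 := by
          apply List.sum_eq_zero
          intro y hy
          rcases List.mem_map.1 hy with ⟨r, hr, rfl⟩
          have hne : (m == r) = false := beq_eq_false_iff_ne.2 (fun e => hx (e ▸ hr))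
          rw [hne, Bool.false_and, if_neg (by simp)]
        rw [List.map_cons, List.sum_cons, htail, add_zero, beq_self_eq_true, Bool.true_and]
      · have hfx : (m == x) = false := beq_eq_false_iff_ne.2 (fun e => hx (e ▸ h))
        rw [List.map_cons, List.sum_cons, ih h hnt, hfx, Bool.false_and,
            if_neg (by simp), zero_add]

-- the histogram of (j % 40, value) pairs, summed along one pattern's table row,
-- counts exactly the indices whose value matches the pattern at j % 40
theorem sum_count_histo (l : List Int) (a g : Int → Int) :
    ((PySem.List.pyRange 0 40 1).map (fun r =>
        (((l.map (fun j => (PySem.Int.mod j 40, a j))).count (r, g r) : Nat) : Int))).sum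
      = (l.countP (fun j => a j == g (PySem.Int.mod j 40)) : Int) := by
  induction l with
  | nil => simp
  | cons j t ih =>
      have hstep : ∀ r : Int,
          ((((j :: t).map (fun j => (PySem.Int.mod j 40, a j))).count (r, g r) : Nat) : Int)
            = (((t.map (fun j => (PySem.Int.mod j 40, a j))).count (r, g r) : Nat) : Int)
              + (if (PySem.Int.mod j 40 == r && a j == g r) then (1 : Int) else 0) := by
        intro r
        rw [List.map_cons, List.count_cons]
        have : (((PySem.Int.mod j 40, a j) : Int × Int) == (r, g r)) = (PySem.Int.mod j 40 == r && a j == g r) := rfl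
        rw [this]
        split <;> push_cast <;> ring
      have hm : PySem.Int.mod j 40 ∈ PySem.List.pyRange 0 40 1 := by
        rw [PySem.List.mem_pyRange_one]
        exact ⟨PySem.Int.mod_nonneg j (by norm_num), PySem.Int.mod_lt j (by norm_num)⟩
      have hnd : (PySem.List.pyRange 0 40 1).Nodup := by decide
      calc ((PySem.List.pyRange 0 40 1).map (fun r =>
              ((((j :: t).map (fun j => (PySem.Int.mod j 40, a j))).count (r, g r) : Nat) : Int))).sum
          = ((PySem.List.pyRange 0 40 1).map (fun r =>
              (((t.map (fun j => (PySem.Int.mod j 40, a j))).count (r, g r) : Nat) : Int)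
              + (if (PySem.Int.mod j 40 == r && a j == g r) then (1 : Int) else 0))).sum := by
            exact congrArg List.sum (List.map_congr_left (fun r _ => hstep r))
        _ = ((PySem.List.pyRange 0 40 1).map (fun r =>
              (((t.map (fun j => (PySem.Int.mod j 40, a j))).count (r, g r) : Nat) : Int))).sum
            + ((PySem.List.pyRange 0 40 1).map (fun r =>
              if (PySem.Int.mod j 40 == r && a j == g r) then (1 : Int) else 0)).sum := by
            exact PySem.List.sum_map_add_int _ _ _
        _ = (t.countP (fun j => a j == g (PySem.Int.mod j 40)) : Int)
            + (if a j == g (PySem.Int.mod j 40) then (1 : Int) else 0) := by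
            rw [ih, sum_ite_unique _ _ (fun r => a j == g r) hm hnd]
        _ = ((j :: t).countP (fun j => a j == g (PySem.Int.mod j 40)) : Int) := by
            rw [List.countP_cons]; split <;> push_cast <;> ring

-- patterns repeat with a period dividing 40
theorem mod_mod_40 (j L : Int) (hL : 0 < L) (hdvd : L ∣ 40) :
    PySem.Int.mod (PySem.Int.mod j 40) L = PySem.Int.mod j L := by
  rw [PySem.Int.mod_eq_emod_of_pos (b := (40 : Int)) (by norm_num),
      PySem.Int.mod_eq_emod_of_pos (b := L) hL,
      PySem.Int.mod_eq_emod_of_pos (b := L) hL]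
  exact Int.emod_emod_of_dvd j hdvd

-- B's table-row sum over the histogram equals A's per-pattern match count
theorem score_eq (answers p : List Int) (hL : 0 < (p.length : Int)) (hdvd : (p.length : Int) ∣ 40) :
    ((PySem.List.pyRange 0 40 1).map (fun r =>
        (PySem.Dict.counter
          ((PySem.List.enumerate answers).map (fun ia => (PySem.Int.mod ia.1 40, ia.2)))).getD
          (r, PySem.List.pyGetD p (PySem.Int.mod r (p.length : Int)) 0) 0)).sum
      = ((PySem.List.pyRange 0 (answers.length : Int) 1).countP
          (fun i => PySem.List.pyGetD answers i 0
              == PySem.List.pyGetD p (PySem.Int.mod i (p.length : Int)) 0) : Int) := by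
  have henum : PySem.List.enumerate answers
      = (PySem.List.pyRange 0 (answers.length : Int) 1).map
          (fun j => (j, PySem.List.pyGetD answers j 0)) := by
    have := PySem.List.enumerate_eq_map_pyRange answers 0
    simpa [PySem.List.pyRange, PySem.List.len] using this
  rw [henum, List.map_map]
  have hkey : ((fun ia : Int × Int => (PySem.Int.mod ia.1 40, ia.2)) ∘
        (fun j => (j, PySem.List.pyGetD answers j 0)))
      = fun j => (PySem.Int.mod j 40, PySem.List.pyGetD answers j 0) := rfl
  rw [hkey]
  have hgetD : ∀ r : Int,
      (PySem.Dict.counter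
          ((PySem.List.pyRange 0 (answers.length : Int) 1).map
            (fun j => (PySem.Int.mod j 40, PySem.List.pyGetD answers j 0)))).getD
          (r, PySem.List.pyGetD p (PySem.Int.mod r (p.length : Int)) 0) 0
        = ((((PySem.List.pyRange 0 (answers.length : Int) 1).map
            (fun j => (PySem.Int.mod j 40, PySem.List.pyGetD answers j 0))).count
            (r, PySem.List.pyGetD p (PySem.Int.mod r (p.length : Int)) 0) : Nat) : Int) := by
    intro r
    exact PySem.Dict.getD_counter _ _
  rw [List.map_congr_left (fun r _ => hgetD r),
      sum_count_histo (PySem.List.pyRange 0 (answers.length : Int) 1)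
        (fun j => PySem.List.pyGetD answers j 0)
        (fun r => PySem.List.pyGetD p (PySem.Int.mod r (p.length : Int)) 0)]
  apply congrArg
  apply List.countP_congr
  intro j _
  rw [mod_mod_40 j _ hL hdvd]

-- the dict-building loop with key extraction is the Counter of the mapped key list
theorem cnt_eq (answers : List Int) :
    (PySem.List.enumerate answers).foldl
      (fun d ia =>
        let k : Int × Int := (PySem.Int.mod ia.1 40, ia.2)
        d.insert k (d.getD k 0 + 1)) PySem.Dict.empty
    = PySem.Dict.counter
        ((PySem.List.enumerate answers).map (fun ia => (PySem.Int.mod ia.1 40, ia.2))) := by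
  rw [← PySem.Dict.foldl_insert_getD_add_one_eq_counter, List.foldl_map]


-- appending loop = filterMap comprehension over the same enumerated list
theorem append_loop_eq_filterMap (l : List (Int × Int)) (m : Int) (acc : List Int) :
    l.foldl (fun acc ij => if ij.2 == m then acc ++ [ij.1 + 1] else acc) acc
    = acc ++ l.filterMap (fun ij => if ij.2 == m then some (ij.1 + 1) else none) := by
  induction l generalizing acc with
  | nil => simp
  | cons x xs ih =>
      rw [List.foldl_cons, ih, List.filterMap_cons]
      by_cases h : x.2 = m <;> simp [h]

-- ===== VERDICT (by name: the statement is the Claim_ definition above) =====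
theorem solution_spec : Claim_equal_solution := by
  intro answers _
  show solution answers = solution_alt answers
  unfold solution solution_alt
  dsimp only
  rw [triple_count, cnt_eq]
  rw [List.map_cons, List.map_cons, List.map_cons, List.map_nil]
  rw [score_eq answers [1,2,3,4,5] (by norm_num) (by norm_num),
      score_eq answers [2,1,2,3,2,4,2,5] (by norm_num) (by norm_num),
      score_eq answers [3,3,1,1,2,2,4,4,5,5] (by norm_num) (by norm_num)]
  rw [append_loop_eq_filterMap]
  norm_num
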